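-- pv_equiv track=rewrite | github.com/gakkistyle/comp9021 | practice_4 solution/hasse_diagram.py | make_hasse_diagram
-- ===== SOURCE A (Python) =====
-- from math import sqrt
--
-- def finddivisors(num):
-- 	result = []
-- 	for i in range(1,num+1):
-- 		if num % i == 0:
-- 			result.append(i)
-- 	return result
--
-- def isprime(n):
-- 	for i in range(2,int(sqrt(n))+1):
-- 		if n% i == 0:
-- 			return False
-- 	return True
--
-- def factorsprint(num):
-- 	subfactors = []
-- 	for i in finddivisors(num):
-- 		if i ==1 or i == num:
-- 			continue
-- 		else:
-- 			if isprime(i):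
-- 				subfactors.append(i)
-- 	result = []
-- 	while num != 1:
-- 		for e in subfactors:
-- 			if num % e == 0:
-- 				result.append(str(e))
-- 				num = num // e
--
-- 	result.sort()
-- 	printresult = ''
-- 	for _ in range(len(result)):
--
-- 		if _+1 < len(result) and result[_] == result[_+1]:
-- 			printresult = printresult + result[_]+'^'
-- 		elif _+1 < len(result):
-- 			printresult = printresult + result[_]+'x'
-- 		else:
-- 			printresult = printresult + result[_]
-- 	return printresult
--
-- def make_hasse_diagram(num):
-- 	factors = {}
-- 	vertices = {}
-- 	edges = {}
-- 	divisors = finddivisors(num)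
-- 	primes = [n for n in divisors if isprime(n)]
-- 	for _ in divisors:
-- 		if _ == 1:
-- 			factors[_] = '1'
-- 		if isprime(_):
-- 			factors[_] = str(_)
-- 		else :
-- 			factors[_] = factorsprint(_)
-- 	return factors
-- ===== SOURCE B (Python) =====
-- def make_hasse_diagram(num):
--     divisors = []
--     i = 1
--     while i * i <= num:
--         if num % i == 0:
--             divisors.append(i)
--             if i != num // i:
--                 divisors.append(num // i)
--         i += 1
--     divisors.sort()
--     factors = {}
--     for d in divisors:
--         if d == 1:
--             factors[d] = '1'
--         else:
--             primes = []
--             m, p = d, 2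
--             while p * p <= m:
--                 if m % p == 0:
--                     primes.append(p)
--                     m //= p
--                 else:
--                     p += 1
--             if m > 1:
--                 primes.append(m)
--             strs = sorted(str(q) for q in primes)
--             parts = []
--             for s, t in zip(strs, strs[1:]):
--                 parts.append(s + ('^' if s == t else 'x'))
--             parts.append(strs[-1])
--             factors[d] = ''.join(parts)
--     return factors
-- ===== Notes on version B (the rewrite author's own statement) =====
-- stated objective: faster
-- what changed: B enumerates the divisors as (i, num//i) pairs with i only up to sqrt(num) and factorizes each divisor by direct trial division, replacing A's full 1..n scans (one per divisor, plus another full scan inside the factorization of every composite divisor) and its repeated-division while loop.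
import Mathlib
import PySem

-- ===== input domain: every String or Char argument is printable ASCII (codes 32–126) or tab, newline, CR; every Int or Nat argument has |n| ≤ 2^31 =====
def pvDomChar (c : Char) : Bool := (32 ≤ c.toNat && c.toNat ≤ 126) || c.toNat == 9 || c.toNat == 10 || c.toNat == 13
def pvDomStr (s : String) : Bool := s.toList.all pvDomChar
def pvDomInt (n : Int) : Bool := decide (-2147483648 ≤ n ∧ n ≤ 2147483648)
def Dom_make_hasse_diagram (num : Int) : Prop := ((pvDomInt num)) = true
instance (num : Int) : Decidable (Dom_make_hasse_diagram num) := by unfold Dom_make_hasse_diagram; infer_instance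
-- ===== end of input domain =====

-- B replaces A's linear divisor scan and per-divisor divisor-list factorization by sqrt-bounded
-- divisor pairing and direct trial division, keeping the exact same factorization strings.

-- ===== PORT A =====
def finddivisors (num : Int) : List Int :=
  (PySem.List.pyRange 1 (num + 1) 1).foldl
    (fun result i => if PySem.Int.mod num i = 0 then result ++ [i] else result) []

-- int(sqrt(n)) ported as integer sqrt (kernel-reducible counting loop): exact here — isprime is
-- applied to positive divisors n ≤ 2^31, where the correctly rounded float sqrt satisfies
-- int(sqrt(n)) = isqrt(n).
def isqrtAux (n : Nat) : Nat → Nat → Nat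
  | 0, r => r
  | fuel + 1, r => if (r + 1) * (r + 1) ≤ n then isqrtAux n fuel (r + 1) else r

def pySqrt (n : Nat) : Nat := isqrtAux n n 0

def isprime (n : Int) : Bool :=
  (PySem.List.pyRange 2 ((pySqrt n.toNat : Int) + 1) 1).all
    (fun i => !(decide (PySem.Int.mod n i = 0)))

-- one 'for e in subfactors' pass of factorsprint's while loop (str concatenation kept on List Char)
def fpPass (subfactors : List Int) (st : Int × List (List Char)) : Int × List (List Char) :=
  subfactors.foldl
    (fun s e =>
      if PySem.Int.mod s.1 e = 0 then (PySem.Int.floordiv s.1 e, s.2 ++ [PySem.Int.toChars e])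
      else s) st

-- the 'while num != 1' loop; the fuel only makes it total (Python diverges exactly where the fuel
-- could run out, which is unreachable for the arguments make_hasse_diagram passes)
def fpLoop (subfactors : List Int) : Nat → Int → List (List Char) → List (List Char)
  | 0, _, res => res
  | f + 1, n, res =>
    if n = 1 then res
    else
      let st := fpPass subfactors (n, res)
      fpLoop subfactors f st.1 st.2

def factorsprint (num : Int) : String :=
  let subfactors := (finddivisors num).foldl
    (fun acc i =>
      if i = 1 ∨ i = num then acc
      else if isprime i then acc ++ [i] else acc) []
  let result := fpLoop subfactors num.toNat num []
  let result := PySem.List.sorted result (fun s => s)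
  let printresult := (PySem.List.pyRange 0 (result.length : Int) 1).foldl
    (fun pr j =>
      if j + 1 < (result.length : Int) ∧
          PySem.List.pyGetD result j [] = PySem.List.pyGetD result (j + 1) [] then
        pr ++ PySem.List.pyGetD result j [] ++ ['^']
      else if j + 1 < (result.length : Int) then
        pr ++ PySem.List.pyGetD result j [] ++ ['x']
      else
        pr ++ PySem.List.pyGetD result j []) []
  String.ofList printresult

def make_hasse_diagram (num : Int) : List (Int × String) :=
  -- vertices and edges are created empty and never used in A; nothing to port for them
  let factors : PySem.Dict Int String := PySem.Dict.empty
  let divisors := finddivisors num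
  let _primes := divisors.filter (fun n => isprime n)
  let factors := divisors.foldl
    (fun f d =>
      let f := if d = 1 then f.insert d "1" else f
      if isprime d then f.insert d (PySem.Int.toStr d)
      else f.insert d (factorsprint d)) factors
  factors.items

-- ===== PORT B =====
-- 'while i * i <= num' divisor-pair collection; the fuel only makes the recursion structural
-- (num.toNat steps always suffice, since the loop stops once i exceeds num)
def altDivisorScan (fuel : Nat) (num i : Int) (divisors : List Int) : List Int :=
  match fuel with
  | 0 => divisors
  | fuel + 1 =>
    if i * i ≤ num then
      altDivisorScan fuel num (i + 1)
        (if PySem.Int.mod num i = 0 then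
          (divisors ++ [i]) ++
            (if i ≠ PySem.Int.floordiv num i then [PySem.Int.floordiv num i] else [])
        else divisors)
    else divisors

-- 'while p * p <= m' trial-division loop; fuel again only a structural-termination bound
def altFactor (fuel : Nat) (m p : Int) (primes : List Int) : Int × List Int :=
  match fuel with
  | 0 => (m, primes)
  | fuel + 1 =>
    if p * p ≤ m then
      if PySem.Int.mod m p = 0 then altFactor fuel (PySem.Int.floordiv m p) p (primes ++ [p])
      else altFactor fuel m (p + 1) primes
    else (m, primes)

def make_hasse_diagram_alt (num : Int) : List (Int × String) :=
  let divisors := PySem.List.sorted (altDivisorScan num.toNat num 1 []) (fun x => x)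
  (divisors.foldl
    (fun (factors : PySem.Dict Int String) d =>
      if d = 1 then factors.insert d "1"
      else
        let mp := altFactor (2 * d).toNat d 2 []
        let primes := if 1 < mp.1 then mp.2 ++ [mp.1] else mp.2
        let strs := PySem.List.sorted (primes.map PySem.Int.toChars) (fun s => s)
        -- zip(strs, strs[1:]) and ''.join ported on List Char (exact)
        let parts := (strs.zip (strs.drop 1)).foldl
          (fun acc st => acc ++ [st.1 ++ (if st.1 = st.2 then ['^'] else ['x'])]) []
        -- strs[-1]: strs is nonempty here (d ≥ 2 has a prime factor), so no IndexError
        let parts := parts ++ [(PySem.List.pyGet? strs (-1)).getD []]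
        factors.insert d (String.ofList (PySem.Chars.join [] parts)))
    PySem.Dict.empty).items

-- ===== PRECONDITION & SPEC =====
def Spec_make_hasse_diagram (num : Int) (out : List (Int × String)) : Prop := out = make_hasse_diagram_alt num
instance (num : Int) (out : List (Int × String)) : Decidable (Spec_make_hasse_diagram num out) := by unfold Spec_make_hasse_diagram; infer_instance

-- ===== CLAIM (what is proved, stated in full; the proofs are below) =====
def Claim_equal_make_hasse_diagram : Prop := ∀ (num : Int), Dom_make_hasse_diagram num → Spec_make_hasse_diagram num (make_hasse_diagram num)

-- ===== LEMMAS AND PROOFS =====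

theorem finddivisors_eq_filter (num : Int) :
    finddivisors num =
      (PySem.List.pyRange 1 (num + 1) 1).filter (fun i => decide (PySem.Int.mod num i = 0)) := by
  unfold finddivisors
  exact PySem.List.foldl_append_ite_eq_filter (fun i => PySem.Int.mod num i = 0) _ []

theorem mem_finddivisors {num x : Int} :
    x ∈ finddivisors num ↔ 1 ≤ x ∧ x ≤ num ∧ x ∣ num := by
  rw [finddivisors_eq_filter]
  simp [List.mem_filter, PySem.List.mem_pyRange_one, PySem.Int.mod_eq_zero_iff_dvd]
  tauto

theorem pairwise_finddivisors (num : Int) :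
    (finddivisors num).Pairwise (· < ·) := by
  rw [finddivisors_eq_filter]
  exact (PySem.List.pairwise_lt_pyRange_one 1 (num + 1)).sublist List.filter_sublist

-- exact division for divisors
theorem fd_mul {num j : Int} (h1 : 1 ≤ j) (hd : j ∣ num) :
    PySem.Int.floordiv num j * j = num := by
  rw [PySem.Int.floordiv_eq_ediv_of_pos (by omega)]
  exact Int.ediv_mul_cancel hd

theorem fd_ge_self {num j : Int} (h1 : 1 ≤ j) (h2 : j * j ≤ num) (hd : j ∣ num) :
    j ≤ PySem.Int.floordiv num j := by
  have h := fd_mul h1 hd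
  nlinarith

theorem altDivisorScan_acc (num : Int) :
    ∀ (k : Nat) (i : Int) (acc : List Int),
      altDivisorScan k num i acc = acc ++ altDivisorScan k num i [] := by
  intro k
  induction k with
  | zero => intro i acc; simp [altDivisorScan]
  | succ k ih =>
    intro i acc
    by_cases h : i * i ≤ num
    · have e1 : altDivisorScan (k + 1) num i acc = altDivisorScan k num (i + 1)
          (if PySem.Int.mod num i = 0 then
            (acc ++ [i]) ++
              (if i ≠ PySem.Int.floordiv num i then [PySem.Int.floordiv num i] else [])
          else acc) := by
        simp only [altDivisorScan]
        rw [if_pos h]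
      have e2 : altDivisorScan (k + 1) num i [] = altDivisorScan k num (i + 1)
          (if PySem.Int.mod num i = 0 then
            ([] ++ [i]) ++
              (if i ≠ PySem.Int.floordiv num i then [PySem.Int.floordiv num i] else [])
          else []) := by
        simp only [altDivisorScan]
        rw [if_pos h]
      have h1 := ih (i + 1) (if PySem.Int.mod num i = 0 then
            (acc ++ [i]) ++
              (if i ≠ PySem.Int.floordiv num i then [PySem.Int.floordiv num i] else [])
          else acc)
      have h2 := ih (i + 1) (if PySem.Int.mod num i = 0 then
            ([] ++ [i]) ++
              (if i ≠ PySem.Int.floordiv num i then [PySem.Int.floordiv num i] else [])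
          else [])
      rw [e1, e2, h1, h2]
      by_cases hm : PySem.Int.mod num i = 0 <;> simp [hm]
    · simp only [altDivisorScan]
      rw [if_neg h, if_neg h]
      simp

theorem mem_altDivisorScan (num : Int) :
    ∀ (k : Nat) (i : Int), 1 ≤ i → (num + 1 - i).toNat ≤ k →
      ∀ x, x ∈ altDivisorScan k num i [] ↔
        ∃ j, i ≤ j ∧ j * j ≤ num ∧ j ∣ num ∧ (x = j ∨ x = PySem.Int.floordiv num j) := by
  intro k
  induction k with
  | zero =>
    intro i hi hk x
    simp only [altDivisorScan, List.not_mem_nil, false_iff]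
    rintro ⟨j, hij, hjj, -, -⟩
    have hjj' : j ≤ j * j := by nlinarith [mul_self_nonneg j, mul_self_nonneg (j - 1)]
    omega
  | succ k ih =>
    intro i hi hk x
    simp only [altDivisorScan]
    by_cases h : i * i ≤ num
    · rw [if_pos h, altDivisorScan_acc num k (i + 1) _, List.mem_append,
        ih (i + 1) (by omega) (by omega) x]
      constructor
      · rintro (hx | hx)
        · by_cases hm : PySem.Int.mod num i = 0
          · rw [if_pos hm] at hx
            have hdvd : i ∣ num := (PySem.Int.mod_eq_zero_iff_dvd num i).1 hm
            refine ⟨i, le_refl i, h, hdvd, ?_⟩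
            rcases List.mem_append.1 hx with hx | hx
            · simp at hx; exact Or.inl hx
            · split at hx <;> simp at hx
              exact Or.inr hx
          · rw [if_neg hm] at hx; simp at hx
        · obtain ⟨j, h1, h2, h3, h4⟩ := hx
          exact ⟨j, by omega, h2, h3, h4⟩
      · rintro ⟨j, hij, hjj, hjd, hx⟩
        rcases eq_or_lt_of_le hij with heq | hlt
        · subst heq
          have hm : PySem.Int.mod num i = 0 := (PySem.Int.mod_eq_zero_iff_dvd num i).2 hjd
          left
          rw [if_pos hm]
          rcases hx with rfl | rfl
          · simp
          · by_cases he : i = PySem.Int.floordiv num i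
            · rw [if_neg (by simpa using he)]; simp; omega
            · rw [if_pos (by simpa using he)]; simp
        · exact Or.inr ⟨j, by omega, hjj, hjd, hx⟩
    · rw [if_neg h]
      simp only [List.not_mem_nil, false_iff]
      rintro ⟨j, hij, hjj, hjd, -⟩
      have : i * i ≤ j * j := by nlinarith
      omega

theorem nodup_altDivisorScan (num : Int) :
    ∀ (k : Nat) (i : Int), 1 ≤ i → (num + 1 - i).toNat ≤ k →
      (altDivisorScan k num i []).Nodup := by
  intro k
  induction k with
  | zero =>
    intro i hi hk
    simp [altDivisorScan]
  | succ k ih =>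
    intro i hi hk
    simp only [altDivisorScan]
    by_cases h : i * i ≤ num
    · rw [if_pos h, altDivisorScan_acc num k (i + 1) _]
      have htail := ih (i + 1) (by omega) (by omega)
      have hmem := mem_altDivisorScan num k (i + 1) (by omega) (by omega)
      have hfresh : ∀ x ∈ altDivisorScan k num (i + 1) [],
          (x ≠ i ∧ (i ∣ num → x ≠ PySem.Int.floordiv num i)) := by
        intro x hx
        obtain ⟨j, hij, hjj, hjd, hx⟩ := (hmem x).1 hx
        have hj1 : 1 ≤ j := by omega
        have hqj : PySem.Int.floordiv num j * j = num := fd_mul hj1 hjd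
        have hjq : j ≤ PySem.Int.floordiv num j := fd_ge_self hj1 hjj hjd
        constructor
        · intro hxi
          rcases hx with hx | hx
          · omega
          · have hfd : PySem.Int.floordiv num j = i := by omega
            rw [hfd] at hqj
            nlinarith
        · intro hid hxe
          have hqi : PySem.Int.floordiv num i * i = num := fd_mul (by omega) hid
          rcases hx with hx | hx
          · have hfd : PySem.Int.floordiv num i = j := by omega
            rw [hfd] at hqi
            nlinarith
          · have hfd : PySem.Int.floordiv num j = PySem.Int.floordiv num i := by omega
            rw [hfd] at hqj
            have hqpos : 0 < PySem.Int.floordiv num i := by nlinarith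
            have : i = j := by nlinarith
            omega
      by_cases hm : PySem.Int.mod num i = 0
      · have hid : i ∣ num := (PySem.Int.mod_eq_zero_iff_dvd num i).1 hm
        rw [if_pos hm]
        by_cases he : i = PySem.Int.floordiv num i
        · rw [if_neg (by simpa using he)]
          simp only [List.nil_append, List.singleton_append, List.nodup_cons]
          exact ⟨fun hx => ((hfresh i hx).1 rfl).elim, htail⟩
        · rw [if_pos (by simpa using he)]
          simp only [List.nil_append, List.singleton_append, List.cons_append,
            List.nodup_cons, List.mem_cons, List.mem_append]
          refine ⟨?_, ?_, htail⟩
          · rintro (hx | hx)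
            · exact he hx
            · exact (hfresh i hx).1 rfl
          · intro hx
            exact (hfresh _ hx).2 hid rfl
      · rw [if_neg hm]; simpa using htail
    · rw [if_neg h]; exact List.nodup_nil

theorem nodup_finddivisors (num : Int) : (finddivisors num).Nodup :=
  (pairwise_finddivisors num).imp (fun h => ne_of_lt h)

theorem divisors_sorted_eq (num : Int) :
    PySem.List.sorted (altDivisorScan num.toNat num 1 []) (fun x => x) = finddivisors num := by
  apply PySem.List.sorted_eq_of_perm_of_pairwise_lt
  · rw [List.perm_ext_iff_of_nodup (nodup_finddivisors num)
      (nodup_altDivisorScan num _ 1 le_rfl (by omega))]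
    intro x
    rw [mem_finddivisors, mem_altDivisorScan num _ 1 le_rfl (by omega)]
    constructor
    · rintro ⟨hx1, hxn, hxd⟩
      by_cases h : x * x ≤ num
      · exact ⟨x, hx1, h, hxd, Or.inl rfl⟩
      · have hq : PySem.Int.floordiv num x * x = num := fd_mul hx1 hxd
        set q := PySem.Int.floordiv num x with hqdef
        have hq1 : 1 ≤ q := by nlinarith
        have hqx : q < x := by nlinarith
        have hqd : q ∣ num := ⟨x, hq.symm⟩
        refine ⟨q, hq1, by nlinarith, hqd, Or.inr ?_⟩
        have hq' : PySem.Int.floordiv num q * q = num := fd_mul hq1 hqd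
        have : (PySem.Int.floordiv num q - x) * q = 0 := by nlinarith
        rcases mul_eq_zero.1 this with h0 | h0
        · omega
        · omega
    · rintro ⟨j, hj1, hjj, hjd, hx⟩
      have hq := fd_mul hj1 hjd
      have hjq := fd_ge_self hj1 hjj hjd
      rcases hx with rfl | rfl
      · exact ⟨hj1, by nlinarith, hjd⟩
      · exact ⟨by nlinarith, by nlinarith, ⟨j, hq.symm⟩⟩
  · exact pairwise_finddivisors num

theorem isqrtAux_eq (n : Nat) :
    ∀ (fuel r : Nat), r * r ≤ n → n.sqrt ≤ r + fuel → isqrtAux n fuel r = n.sqrt := by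
  intro fuel
  induction fuel with
  | zero =>
    intro r h1 h2
    have h3 : r ≤ n.sqrt := Nat.le_sqrt.2 h1
    simp only [isqrtAux]
    omega
  | succ fuel ih =>
    intro r h1 h2
    simp only [isqrtAux]
    by_cases h : (r + 1) * (r + 1) ≤ n
    · rw [if_pos h]
      exact ih (r + 1) h (by omega)
    · rw [if_neg h]
      have h3 : r ≤ n.sqrt := Nat.le_sqrt.2 h1
      have h4 : ¬ (r + 1) ≤ n.sqrt := fun hc => h (Nat.le_sqrt.1 hc)
      omega

theorem pySqrt_eq (n : Nat) : pySqrt n = n.sqrt := by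
  unfold pySqrt
  exact isqrtAux_eq n n 0 (by omega) (by simpa using Nat.sqrt_le_self n)

theorem isprime_true_iff {n : Int} (h : 2 ≤ n) : isprime n = true ↔ n.toNat.Prime := by
  unfold isprime
  rw [pySqrt_eq]
  rw [List.all_eq_true, Nat.prime_def_le_sqrt]
  constructor
  · intro H
    refine ⟨by omega, fun m hm hms hdvd => ?_⟩
    have h1 : (m : Int) ∈ PySem.List.pyRange 2 ((n.toNat.sqrt : Int) + 1) :=
      PySem.List.mem_pyRange_one.2 ⟨by exact_mod_cast hm, by push_cast; omega⟩
    have h2 := H _ h1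
    simp only [Bool.not_eq_true', decide_eq_false_iff_not, PySem.Int.mod_eq_zero_iff_dvd] at h2
    apply h2
    have h3 : (m : Int) ∣ (n.toNat : Int) := Int.natCast_dvd_natCast.2 hdvd
    rwa [Int.toNat_of_nonneg (by omega)] at h3
  · rintro ⟨-, H⟩ i hi
    obtain ⟨hi2, hilt⟩ := PySem.List.mem_pyRange_one.1 hi
    simp only [Bool.not_eq_true', decide_eq_false_iff_not, PySem.Int.mod_eq_zero_iff_dvd]
    intro hdvd
    have hint : i.toNat ∣ n.toNat := by
      have h4 : ((i.toNat : Int)) ∣ ((n.toNat : Int)) := by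
        rwa [Int.toNat_of_nonneg (by omega), Int.toNat_of_nonneg (by omega)]
      exact_mod_cast h4
    exact H i.toNat (by omega) (by omega) hint

def subfactorsOf (d : Int) : List Int :=
  (finddivisors d).foldl
    (fun acc i =>
      if i = 1 ∨ i = d then acc
      else if isprime i then acc ++ [i] else acc) []

theorem subfactorsOf_eq_filter (d : Int) :
    subfactorsOf d = (finddivisors d).filter
      (fun i => decide (¬(i = 1 ∨ i = d) ∧ isprime i = true)) := by
  unfold subfactorsOf
  rw [PySem.List.foldl_congr_mem _ _
    (fun acc i => if ¬(i = 1 ∨ i = d) ∧ isprime i = true then acc ++ [i] else acc) []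
    (by intro acc x _; by_cases h1 : x = 1 ∨ x = d <;> by_cases h2 : isprime x <;> simp [h1, h2])]
  exact PySem.List.foldl_append_ite_eq_filter _ _ []

theorem mem_subfactorsOf {d e : Int} (hd : 2 ≤ d) :
    e ∈ subfactorsOf d ↔ e ∣ d ∧ 2 ≤ e ∧ e ≠ d ∧ e.toNat.Prime := by
  rw [subfactorsOf_eq_filter, List.mem_filter]
  simp only [decide_eq_true_eq, mem_finddivisors]
  constructor
  · rintro ⟨⟨h1, _, hdvd⟩, hnot, hp⟩
    have he2 : 2 ≤ e := by
      rcases eq_or_lt_of_le h1 with heq | _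
      · exact absurd (Or.inl heq.symm) hnot
      · omega
    exact ⟨hdvd, he2, fun hcon => hnot (Or.inr hcon), (isprime_true_iff he2).1 hp⟩
  · rintro ⟨hdvd, he2, hne, hp⟩
    have hle : e ≤ d := Int.le_of_dvd (by omega) hdvd
    exact ⟨⟨by omega, hle, hdvd⟩, by omega, (isprime_true_iff he2).2 hp⟩

theorem prod_pos_of_ge_two : ∀ (l : List Int), (∀ e ∈ l, 2 ≤ e) → 1 ≤ l.prod := by
  intro l
  induction l with
  | nil => simp
  | cons a t ih =>
    intro h
    rw [List.prod_cons]
    have ha := h a (by simp)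
    have ht := ih (fun e he => h e (by simp [he]))
    nlinarith

theorem fpPass_spec (S : List Int) (hS : ∀ e ∈ S, 2 ≤ e) :
    ∀ (n : Int) (res : List (List Char)), 1 ≤ n →
      ∃ (n' : Int) (ds : List Int),
        fpPass S (n, res) = (n', res ++ ds.map PySem.Int.toChars) ∧
        ds.prod * n' = n ∧ (∀ e ∈ ds, e ∈ S) ∧ 1 ≤ n' ∧
        ((∃ e ∈ S, e ∣ n) → ds ≠ []) := by
  induction S with
  | nil =>
    intro n res h1
    exact ⟨n, [], by simp [fpPass], by simp, by simp, h1, by simp⟩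
  | cons e S ih =>
    intro n res h1
    have he2 : 2 ≤ e := hS e (by simp)
    have hS' : ∀ x ∈ S, 2 ≤ x := fun x hx => hS x (by simp [hx])
    by_cases hm : PySem.Int.mod n e = 0
    · have hdvd : e ∣ n := (PySem.Int.mod_eq_zero_iff_dvd n e).1 hm
      have hq : PySem.Int.floordiv n e * e = n := fd_mul (by omega) hdvd
      have hn1 : 1 ≤ PySem.Int.floordiv n e := by nlinarith
      obtain ⟨n', ds, heq, hprod, hmemS, hn', -⟩ :=
        ih hS' (PySem.Int.floordiv n e) (res ++ [PySem.Int.toChars e]) hn1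
      refine ⟨n', e :: ds, ?_, ?_, ?_, hn', fun _ => by simp⟩
      · show (e :: S).foldl _ (n, res) = _
        rw [List.foldl_cons]
        simp only [hm, if_pos]
        rw [show (S.foldl _ (PySem.Int.floordiv n e, res ++ [PySem.Int.toChars e]) :
            Int × List (List Char)) = fpPass S (PySem.Int.floordiv n e,
            res ++ [PySem.Int.toChars e]) from rfl, heq]
        simp
      · rw [List.prod_cons, mul_assoc, hprod, mul_comm]
        exact hq
      · intro x hx
        rcases List.mem_cons.1 hx with rfl | hx
        · simp
        · simp [hmemS x hx]
    · obtain ⟨n', ds, heq, hprod, hmemS, hn', hne⟩ := ih hS' n res h1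
      refine ⟨n', ds, ?_, hprod, fun x hx => by simp [hmemS x hx], hn', ?_⟩
      · show (e :: S).foldl _ (n, res) = _
        rw [List.foldl_cons]
        simp only [hm, if_neg]
        exact heq
      · rintro ⟨x, hxS, hxd⟩
        rcases List.mem_cons.1 hxS with rfl | hx
        · exact absurd ((PySem.Int.mod_eq_zero_iff_dvd n x).2 hxd) hm
        · exact hne ⟨x, hx, hxd⟩

theorem fpLoop_spec (d : Int) (hd2 : 2 ≤ d) (hdnp : ¬ d.toNat.Prime) :
    ∀ (f : Nat) (n : Int) (res : List (List Char)), 1 ≤ n → n ∣ d → n.toNat ≤ f →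
      ∃ ds : List Int, fpLoop (subfactorsOf d) f n res = res ++ ds.map PySem.Int.toChars ∧
        ds.prod = n ∧ ∀ e ∈ ds, 2 ≤ e ∧ e.toNat.Prime := by
  intro f
  induction f with
  | zero => intro n res h1 _ hf; omega
  | succ f ih =>
    intro n res h1 hdvd hf
    by_cases hn1 : n = 1
    · subst hn1
      exact ⟨[], by simp [fpLoop], by simp, by simp⟩
    · have hn2 : 2 ≤ n := by omega
      have hSsub : ∀ e ∈ subfactorsOf d, 2 ≤ e := fun e he => ((mem_subfactorsOf hd2).1 he).2.1
      obtain ⟨n', ds, heq, hprod, hmem, hn', hne⟩ := fpPass_spec _ hSsub n res h1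
      have hpf : n.toNat.minFac.Prime := Nat.minFac_prime (by omega)
      have hdvdn : (n.toNat.minFac : Int) ∣ n := by
        have h5 : ((n.toNat.minFac : Int)) ∣ ((n.toNat : Int)) :=
          Int.natCast_dvd_natCast.2 (Nat.minFac_dvd n.toNat)
        rwa [Int.toNat_of_nonneg (by omega)] at h5
      have hex : ∃ e ∈ subfactorsOf d, e ∣ n := by
        refine ⟨(n.toNat.minFac : Int), ?_, hdvdn⟩
        rw [mem_subfactorsOf hd2]
        refine ⟨dvd_trans hdvdn hdvd, by exact_mod_cast hpf.two_le, ?_, by simpa using hpf⟩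
        intro hcontra
        apply hdnp
        have : d.toNat = n.toNat.minFac := by omega
        rw [this]; exact hpf
      have hdsne : ds ≠ [] := hne hex
      have hprodge : 2 ≤ ds.prod := by
        rcases ds with - | ⟨a, t⟩
        · exact absurd rfl hdsne
        · have hS2 : ∀ e ∈ t, 2 ≤ e := fun e he => hSsub e (hmem e (by simp [he]))
          have ht := prod_pos_of_ge_two t hS2
          rw [List.prod_cons]
          have ha2 : 2 ≤ a := hSsub a (hmem a (by simp))
          nlinarith
      have hlt : n' < n := by nlinarith
      have hdvd' : n' ∣ d := dvd_trans ⟨ds.prod, by rw [← hprod]; ring⟩ hdvd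
      obtain ⟨ds', heq', hprod', hmem'⟩ := ih n' (res ++ ds.map PySem.Int.toChars) hn' hdvd'
        (by omega)
      refine ⟨ds ++ ds', ?_, ?_, ?_⟩
      · show fpLoop _ (f + 1) n res = _
        simp only [fpLoop]
        rw [if_neg hn1]
        show fpLoop _ f (fpPass _ (n, res)).1 (fpPass _ (n, res)).2 = _
        rw [heq]
        show fpLoop _ f n' (res ++ ds.map PySem.Int.toChars) = _
        rw [heq']
        simp [List.append_assoc]
      · rw [List.prod_append, hprod', hprod]
      · intro e he
        rcases List.mem_append.1 he with he | he
        · exact ⟨hSsub e (hmem e he), ((mem_subfactorsOf hd2).1 (hmem e he)).2.2.2⟩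
        · exact hmem' e he

-- both factorizations are permutations of primeFactorsList, cast to Int
theorem cast_prod_toNat : ∀ (l : List Int), (∀ e ∈ l, 0 ≤ e) →
    (((l.map Int.toNat).prod : Nat) : Int) = l.prod := by
  intro l
  induction l with
  | nil => simp
  | cons a t ih =>
    intro h
    have ha : 0 ≤ a := h a (by simp)
    simp only [List.map_cons, List.prod_cons, Nat.cast_mul]
    rw [ih (fun e he => h e (by simp [he])), Int.toNat_of_nonneg ha]

theorem perm_primeFactorsList {l : List Int} (hl : ∀ e ∈ l, 2 ≤ e ∧ e.toNat.Prime)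
    {n : Int} (hn : 1 ≤ n) (hprod : l.prod = n) :
    l.Perm (n.toNat.primeFactorsList.map (fun p : Nat => (p : Int))) := by
  have hprodN : (l.map Int.toNat).prod = n.toNat := by
    have h0 := cast_prod_toNat l (fun e he => by linarith [(hl e he).1])
    omega
  have key : (l.map Int.toNat).Perm n.toNat.primeFactorsList :=
    Nat.primeFactorsList_unique hprodN (by
      intro p hp
      obtain ⟨e, he, rfl⟩ := List.mem_map.1 hp
      exact (hl e he).2)
  have h1 : (l.map Int.toNat).map (fun p : Nat => (p : Int)) = l := by
    rw [List.map_map]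
    conv_rhs => rw [← List.map_id l]
    apply List.map_congr_left
    intro e he
    have h0 : 0 ≤ e := by linarith [(hl e he).1]
    simp [Function.comp, Int.toNat_of_nonneg h0]
  rw [← h1]
  exact key.map _

def canonStrs (d : Int) : List (List Char) :=
  PySem.List.sorted ((d.toNat.primeFactorsList.map (fun p : Nat => (p : Int))).map
    PySem.Int.toChars) (fun s => s)

-- core's List.instLT and Mathlib's LinearOrder LT on List Char define the same order
theorem sorted_bridge (xs : List (List Char)) :
    @PySem.List.sorted (List Char) (List Char) List.instLT (fun a b => a.decidableLT b) xs
      (fun s => s) false =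
    @PySem.List.sorted (List Char) (List Char) List.instLinearOrder.toLT
      LinearOrder.toDecidableLT xs (fun s => s) false := by
  unfold PySem.List.sorted
  simp only [if_neg (by decide : ¬ (false = true))]
  congr 1
  funext acc x
  congr 1
  funext a b
  exact decide_eq_decide.mpr (List.lt_iff_lex_lt a b)

theorem sorted_toChars_eq_canon {l : List Int} {d : Int} (hd : 1 ≤ d)
    (hl : ∀ e ∈ l, 2 ≤ e ∧ e.toNat.Prime) (hprod : l.prod = d) :
    PySem.List.sorted (l.map PySem.Int.toChars) (fun s => s) = canonStrs d := by
  unfold canonStrs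
  rw [sorted_bridge, sorted_bridge]
  exact PySem.List.sorted_eq_sorted_of_perm _ _ (fun s : List Char => s) (fun a b h => h)
    ((perm_primeFactorsList hl hd hprod).map PySem.Int.toChars)

theorem factorsprint_result_eq (d : Int) (hd2 : 2 ≤ d) (hdnp : ¬ d.toNat.Prime) :
    PySem.List.sorted (fpLoop (subfactorsOf d) d.toNat d []) (fun s => s) = canonStrs d := by
  obtain ⟨ds, heq, hprod, hmem⟩ := fpLoop_spec d hd2 hdnp d.toNat d [] (by omega) dvd_rfl le_rfl
  rw [heq, List.nil_append]
  exact sorted_toChars_eq_canon (by omega) hmem hprod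

-- exit state of the trial-division loop: the remaining m is 1 or prime
theorem altFactor_exit {m p : Int} (hm1 : 1 ≤ m) (hp2 : 2 ≤ p)
    (hnd : ∀ q, 2 ≤ q → q < p → ¬ q ∣ m) (hpm : m < p * p) :
    m = 1 ∨ (2 ≤ m ∧ m.toNat.Prime) := by
  by_cases hm2 : m = 1
  · exact Or.inl hm2
  · right
    refine ⟨by omega, ?_⟩
    rw [Nat.prime_def_le_sqrt]
    refine ⟨by omega, fun q h1 h2 hdvd => ?_⟩
    have h7 : m.toNat.sqrt * m.toNat.sqrt ≤ m.toNat := by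
      have h8 := Nat.sqrt_le' m.toNat
      rwa [pow_two] at h8
    have h6 : q * q ≤ m.toNat := Nat.le_trans (Nat.mul_le_mul h2 h2) h7
    have hqq : (q : Int) * q ≤ m := by push_cast; omega
    have hqp : (q : Int) < p := by nlinarith [hqq]
    have h9 : (q : Int) ∣ m := by
      have h8 := Int.natCast_dvd_natCast.2 hdvd
      rwa [Int.toNat_of_nonneg (by omega)] at h8
    exact hnd q (by exact_mod_cast h1) hqp h9

-- B-side trial division spec (induction on the fuel)
theorem altFactor_spec :
    ∀ (k : Nat) (m p : Int) (acc : List Int), (2 * m - p).toNat ≤ k → 1 ≤ m → 2 ≤ p →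
      (∀ q, 2 ≤ q → q < p → ¬ q ∣ m) →
      ∃ (r : Int) (ds : List Int), altFactor k m p acc = (r, acc ++ ds) ∧
        ds.prod * r = m ∧ (∀ e ∈ ds, 2 ≤ e ∧ e.toNat.Prime) ∧ 1 ≤ r ∧
        (r = 1 ∨ (2 ≤ r ∧ r.toNat.Prime)) := by
  intro k
  induction k with
  | zero =>
    intro m p acc hk hm1 hp2 hnd
    have hple : p ≤ p * p := by nlinarith
    refine ⟨m, [], by simp [altFactor], by simp, by simp, hm1,
      altFactor_exit hm1 hp2 hnd (by omega)⟩
  | succ k ih =>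
    intro m p acc hk hm1 hp2 hnd
    have hple : p ≤ p * p := by nlinarith
    simp only [altFactor]
    by_cases h : p * p ≤ m
    · rw [if_pos h]
      by_cases hmod : PySem.Int.mod m p = 0
      · rw [if_pos hmod]
        have hdvd : p ∣ m := (PySem.Int.mod_eq_zero_iff_dvd m p).1 hmod
        have hq : PySem.Int.floordiv m p * p = m := fd_mul (by omega) hdvd
        have hm1' : 1 ≤ PySem.Int.floordiv m p := by nlinarith
        have hppr : p.toNat.Prime := by
          rw [Nat.prime_def_lt]
          refine ⟨by omega, fun q hq1 hq2 => ?_⟩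
          by_contra hq3
          have hq4 : 2 ≤ (q : Int) := by
            rcases Nat.lt_or_ge q 2 with h5 | h5
            · interval_cases q
              · simp at hq2; omega
              · exact absurd rfl hq3
            · exact_mod_cast h5
          have hq5 : (q : Int) ∣ p := by
            have h6 := Int.natCast_dvd_natCast.2 hq2
            rwa [Int.toNat_of_nonneg (by omega)] at h6
          exact hnd q hq4 (by push_cast at hq1 ⊢; omega) (dvd_trans hq5 hdvd)
        have hnd' : ∀ q, 2 ≤ q → q < p → ¬ q ∣ PySem.Int.floordiv m p := by
          intro q h1 h2 h3
          exact hnd q h1 h2 (dvd_trans h3 ⟨p, hq.symm⟩)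
        have hmeas : (2 * PySem.Int.floordiv m p - p).toNat ≤ k := by
          have hle1 : 2 * PySem.Int.floordiv m p ≤ m := by nlinarith
          have hle2 : p ≤ PySem.Int.floordiv m p := by nlinarith
          omega
        obtain ⟨r, ds, heq, hprod, hmem, hr1, hrp⟩ :=
          ih (PySem.Int.floordiv m p) p (acc ++ [p]) hmeas hm1' hp2 hnd'
        refine ⟨r, p :: ds, by rw [heq]; simp, ?_, ?_, hr1, hrp⟩
        · rw [List.prod_cons, mul_assoc, hprod, mul_comm]
          exact hq
        · intro e he
          rcases List.mem_cons.1 he with rfl | he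
          · exact ⟨by omega, hppr⟩
          · exact hmem e he
      · rw [if_neg hmod]
        have hnd' : ∀ q, 2 ≤ q → q < p + 1 → ¬ q ∣ m := by
          intro q h1 h2 h3
          rcases eq_or_lt_of_le (show q ≤ p by omega) with rfl | h4
          · exact hmod ((PySem.Int.mod_eq_zero_iff_dvd m q).2 h3)
          · exact hnd q h1 h4 h3
        have hmeas : (2 * m - (p + 1)).toNat ≤ k := by omega
        exact ih m (p + 1) acc hmeas hm1 (by omega) hnd'
    · rw [if_neg h]
      exact ⟨m, [], by simp, by simp, by simp, hm1,
        altFactor_exit hm1 hp2 hnd (by omega)⟩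

theorem canonStrs_ne_nil (d : Int) (hd2 : 2 ≤ d) : canonStrs d ≠ [] := by
  unfold canonStrs
  rw [Ne, PySem.List.sorted_eq_nil_iff]
  simp only [List.map_eq_nil_iff]
  intro hcon
  have h := Nat.prod_primeFactorsList (n := d.toNat) (by omega)
  rw [hcon] at h
  simp at h
  omega

theorem canonStrs_prime {d : Int} (hd2 : 2 ≤ d) (hp : d.toNat.Prime) :
    canonStrs d = [PySem.Int.toChars d] := by
  unfold canonStrs
  rw [Nat.primeFactorsList_prime hp]
  simp only [List.map_cons, List.map_nil]
  rw [show ((d.toNat : Int)) = d by omega]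
  rfl

theorem alt_strs_eq (d : Int) (hd2 : 2 ≤ d) :
    PySem.List.sorted
      ((if 1 < (altFactor (2 * d).toNat d 2 []).1 then
          (altFactor (2 * d).toNat d 2 []).2 ++ [(altFactor (2 * d).toNat d 2 []).1]
        else (altFactor (2 * d).toNat d 2 []).2).map PySem.Int.toChars) (fun s => s) =
      canonStrs d := by
  obtain ⟨r, ds, heq, hprod, hmem, hr1, hrp⟩ :=
    altFactor_spec ((2 * d).toNat) d 2 [] (by omega) (by omega) le_rfl
      (fun q h1 h2 => absurd h1 (by omega))
  simp only [List.nil_append] at heq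
  rw [heq]
  simp only
  rcases hrp with rfl | ⟨hr2, hrpr⟩
  · rw [if_neg (by omega)]
    rw [mul_one] at hprod
    exact sorted_toChars_eq_canon (by omega) hmem hprod
  · rw [if_pos (by omega)]
    refine sorted_toChars_eq_canon (by omega) ?_ ?_
    · intro e he
      rcases List.mem_append.1 he with he | he
      · exact hmem e he
      · simp at he
        subst he
        exact ⟨hr2, hrpr⟩
    · rw [List.prod_append]
      simpa using hprod

-- the per-index emission of factorsprint's printresult loop
def fmtG (S : List (List Char)) (j : Int) : List Char :=
  if j + 1 < (S.length : Int) ∧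
      PySem.List.pyGetD S j [] = PySem.List.pyGetD S (j + 1) [] then
    PySem.List.pyGetD S j [] ++ ['^']
  else if j + 1 < (S.length : Int) then
    PySem.List.pyGetD S j [] ++ ['x']
  else
    PySem.List.pyGetD S j []

def fmtFold (S : List (List Char)) : List Char :=
  (PySem.List.pyRange 0 (S.length : Int)).foldl
    (fun pr j =>
      if j + 1 < (S.length : Int) ∧
          PySem.List.pyGetD S j [] = PySem.List.pyGetD S (j + 1) [] then
        pr ++ PySem.List.pyGetD S j [] ++ ['^']
      else if j + 1 < (S.length : Int) then
        pr ++ PySem.List.pyGetD S j [] ++ ['x']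
      else
        pr ++ PySem.List.pyGetD S j []) []

theorem fmtFold_eq_flatMap (S : List (List Char)) :
    fmtFold S = (PySem.List.pyRange 0 (S.length : Int)).flatMap (fmtG S) := by
  unfold fmtFold
  rw [PySem.List.foldl_congr_mem _ _ (fun pr j => pr ++ fmtG S j) [] (by
    intro acc x _
    dsimp only
    unfold fmtG
    by_cases hA : x + 1 < (S.length : Int) ∧
        PySem.List.pyGetD S x [] = PySem.List.pyGetD S (x + 1) []
    · rw [if_pos hA, if_pos hA, List.append_assoc]
    · rw [if_neg hA, if_neg hA]
      by_cases hB : x + 1 < (S.length : Int)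
      · rw [if_pos hB, if_pos hB, List.append_assoc]
      · rw [if_neg hB, if_neg hB])]
  rw [PySem.List.foldl_append_eq_flatMap]
  simp

theorem fmtB_parts (S : List (List Char)) :
    (S.zip (S.drop 1)).foldl
      (fun acc st => acc ++ [st.1 ++ (if st.1 = st.2 then ['^'] else ['x'])]) [] =
    (S.zip (S.drop 1)).map (fun st => st.1 ++ (if st.1 = st.2 then ['^'] else ['x'])) := by
  rw [PySem.List.foldl_append_singleton_eq_map]
  simp

theorem join_nil_cons (a : List Char) (L : List (List Char)) (h : L ≠ []) :
    PySem.Chars.join [] (a :: L) = a ++ PySem.Chars.join [] L := by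
  rcases L with - | ⟨b, t⟩
  · exact absurd rfl h
  · rw [PySem.Chars.join_cons_cons]
    simp

theorem pyGet?_neg_one {α : Type} (S : List α) (h : S ≠ []) :
    PySem.List.pyGet? S (-1) = S.getLast? := by
  have hl : 0 < S.length := List.length_pos_of_ne_nil h
  simp only [PySem.List.pyGet?, PySem.List.pyIdx?]
  rw [if_neg (by omega), if_pos (by push_cast; omega)]
  rw [List.getLast?_eq_getElem?]
  norm_num

theorem fmtG_cons (x : List Char) (T : List (List Char)) (k : Nat) (hk : k < T.length) :
    fmtG (x :: T) ((k : Int) + 1) = fmtG T (k : Int) := by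
  unfold fmtG
  have i1 : PySem.List.pyGetD (x :: T) ((k : Int) + 1) [] = PySem.List.pyGetD T (k : Int) [] := by
    rw [show ((k : Int) + 1) = ((k + 1 : Nat) : Int) by push_cast; ring,
      PySem.List.pyGetD_natCast, PySem.List.pyGetD_natCast, List.getD_cons_succ]
  have i2 : PySem.List.pyGetD (x :: T) ((k : Int) + 1 + 1) [] =
      PySem.List.pyGetD T ((k : Int) + 1) [] := by
    rw [show ((k : Int) + 1 + 1) = ((k + 2 : Nat) : Int) by push_cast; ring,
      show ((k : Int) + 1) = ((k + 1 : Nat) : Int) by push_cast; ring,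
      PySem.List.pyGetD_natCast, PySem.List.pyGetD_natCast, List.getD_cons_succ]
  have c : ((k : Int) + 1 + 1 < (((x :: T).length : Nat) : Int)) ↔
      ((k : Int) + 1 < ((T.length : Nat) : Int)) := by
    simp only [List.length_cons]
    push_cast
    omega
  rw [i1, i2]
  simp only [c]

theorem flatMap_fmtG_shift (x : List Char) (T : List (List Char)) :
    (PySem.List.pyRange 1 (((x :: T).length : Nat) : Int)).flatMap (fmtG (x :: T)) =
    (PySem.List.pyRange 0 ((T.length : Nat) : Int)).flatMap (fmtG T) := by
  rw [PySem.List.pyRange_one 1, PySem.List.pyRange_one 0]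
  have hlen1 : ((((x :: T).length : Nat) : Int) - 1).toNat = T.length := by
    simp only [List.length_cons]; push_cast; omega
  have hlen0 : (((T.length : Nat) : Int) - 0).toNat = T.length := by omega
  rw [hlen1, hlen0, List.flatMap_map, List.flatMap_map]
  rw [List.flatMap_def, List.flatMap_def]
  refine congrArg List.flatten ?_
  apply List.map_congr_left
  intro k hk
  show fmtG (x :: T) (1 + (k : Int)) = fmtG T (0 + (k : Int))
  rw [show (1 + (k : Int)) = (k : Int) + 1 by ring, zero_add]
  exact fmtG_cons x T k (List.mem_range.1 hk)

theorem fmt_main : ∀ (S : List (List Char)), S ≠ [] →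
    (PySem.List.pyRange 0 ((S.length : Nat) : Int)).flatMap (fmtG S) =
    PySem.Chars.join []
      ((S.zip (S.drop 1)).map (fun st => st.1 ++ (if st.1 = st.2 then ['^'] else ['x'])) ++
        [(PySem.List.pyGet? S (-1)).getD []]) := by
  intro S
  induction S with
  | nil => intro h; exact absurd rfl h
  | cons x T ih =>
    intro _
    rcases T with - | ⟨y, t⟩
    · have h1 : ((([x] : List (List Char)).length : Nat) : Int) = 1 := by simp
      rw [pyGet?_neg_one _ (by simp), h1]
      rw [show PySem.List.pyRange 0 1 = [0] from rfl]
      simp only [List.flatMap_cons, List.flatMap_nil, List.append_nil]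
      have h2 : fmtG [x] 0 = x := by
        unfold fmtG
        rw [h1, if_neg (by norm_num), if_neg (by norm_num), PySem.List.pyGetD_ofNat']
        rfl
      rw [h2]
      simp [PySem.Chars.join_singleton]
    · have hT : (y :: t) ≠ [] := by simp
      have hpos : (0 : Int) < (((x :: y :: t).length : Nat) : Int) := by
        simp only [List.length_cons]; push_cast; omega
      rw [PySem.List.pyRange_one_cons hpos, List.flatMap_cons]
      simp only [zero_add]
      rw [flatMap_fmtG_shift x (y :: t), ih hT]
      simp only [List.drop_succ_cons, List.drop_zero, List.zip_cons_cons, List.map_cons,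
        List.cons_append]
      rw [join_nil_cons _ _ (by simp)]
      have h0 : fmtG (x :: y :: t) 0 = x ++ (if x = y then ['^'] else ['x']) := by
        unfold fmtG
        have e0 : PySem.List.pyGetD (x :: y :: t) 0 [] = x := by
          rw [PySem.List.pyGetD_ofNat']; rfl
        have e1 : PySem.List.pyGetD (x :: y :: t) (0 + 1) [] = y := by
          norm_num
          rw [PySem.List.pyGetD_ofNat']
          rfl
        have hc : ((0 : Int) + 1 < (((x :: y :: t).length : Nat) : Int)) := by
          simp only [List.length_cons]; push_cast; omega
        rw [e0, e1]
        by_cases hxy : x = y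
        · rw [if_pos ⟨hc, hxy⟩, hxy]
          simp
        · rw [if_neg (by tauto), if_pos hc]
          simp [hxy]
      rw [h0, pyGet?_neg_one (y :: t) hT, pyGet?_neg_one (x :: y :: t) (by simp),
        List.getLast?_cons_cons]

theorem factorsprint_eq (d : Int) (hd2 : 2 ≤ d) (hnp : ¬ d.toNat.Prime) :
    factorsprint d = String.ofList
      ((PySem.List.pyRange 0 ((canonStrs d).length : Int)).flatMap (fmtG (canonStrs d))) := by
  have h0 : factorsprint d = String.ofList
      (fmtFold (PySem.List.sorted (fpLoop (subfactorsOf d) d.toNat d []) (fun s => s))) := rfl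
  rw [h0, factorsprint_result_eq d hd2 hnp, fmtFold_eq_flatMap]

-- ===== VERDICT (by name: the statement is the Claim_ definition above) =====
theorem make_hasse_diagram_spec : Claim_equal_make_hasse_diagram := by
  intro num _
  unfold Spec_make_hasse_diagram make_hasse_diagram make_hasse_diagram_alt
  rw [divisors_sorted_eq]
  refine congrArg PySem.Dict.items ?_
  apply PySem.List.foldl_congr_mem
  intro f d hd
  dsimp only
  obtain ⟨hd1, hdn, hdvd⟩ := mem_finddivisors.1 hd
  by_cases h1 : d = 1
  · subst h1
    rw [if_pos rfl, if_pos rfl, if_pos (by decide : isprime 1 = true),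
      PySem.Dict.insert_insert_self]
    rfl
  · rw [if_neg h1, if_neg h1]
    have hd2 : 2 ≤ d := by omega
    rw [alt_strs_eq d hd2]
    by_cases hp : d.toNat.Prime
    · rw [if_pos ((isprime_true_iff hd2).2 hp), canonStrs_prime hd2 hp]
      congr 1
      rw [pyGet?_neg_one _ (by simp)]
      simp [PySem.Chars.join_singleton]
      rfl
    · have hb : isprime d = false := by
        rcases Bool.eq_false_or_eq_true (isprime d) with hb | hb
        · exact absurd ((isprime_true_iff hd2).1 hb) hp
        · exact hb
      rw [if_neg (by simp [hb])]
      congr 1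
      rw [factorsprint_eq d hd2 hp, fmt_main (canonStrs d) (canonStrs_ne_nil d hd2), fmtB_parts]
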